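-- pv_equiv track=rewrite | github.com/ItsMehRAWRXD/RawrXDA | scripts/historic_dumps_audit.py | compare_parity_trees
-- ===== SOURCE A (Python) =====
-- from typing import Dict, Iterable, List, Tuple
--
-- def compare_parity_trees(trees: Dict[str, Dict[str, str]]) -> Dict[str, object]:
--     names = sorted(trees.keys())
--     pairwise: Dict[str, Dict[str, int]] = {}
--     for i, left in enumerate(names):
--         for right in names[i + 1 :]:
--             left_keys = set(trees[left].keys())
--             right_keys = set(trees[right].keys())
--             common = left_keys & right_keys
--             same = sum(1 for rel in common if trees[left][rel] == trees[right][rel])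
--             pairwise[f"{left}__vs__{right}"] = {
--                 "common_paths": len(common),
--                 "same_content": same,
--                 "different_content": len(common) - same,
--                 f"only_{left}": len(left_keys - right_keys),
--                 f"only_{right}": len(right_keys - left_keys),
--             }
--     return pairwise
-- ===== SOURCE B (Python) =====
-- from typing import Dict
--
-- def compare_parity_trees(trees: Dict[str, Dict[str, str]]) -> Dict[str, object]:
--     names = sorted(trees.keys())
--     items = {name: sorted(tree.items(), key=lambda kv: kv[0]) for name, tree in trees.items()}
--     pairwise: Dict[str, Dict[str, int]] = {}
--     for i, left in enumerate(names):
--         for right in names[i + 1:]: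
--             ls, rs = items[left], items[right]
--             a = b = common = same = 0
--             while a < len(ls) and b < len(rs):
--                 ka, va = ls[a]
--                 kb, vb = rs[b]
--                 if ka < kb:
--                     a += 1
--                 elif kb < ka:
--                     b += 1
--                 else:
--                     common += 1
--                     if va == vb:
--                         same += 1
--                     a += 1
--                     b += 1
--             pairwise[f"{left}__vs__{right}"] = {
--                 "common_paths": common,
--                 "same_content": same,
--                 "different_content": common - same,
--                 f"only_{left}": len(ls) - common,
--                 f"only_{right}": len(rs) - common,
--             }
--     return pairwise
-- ===== Notes on version B (the rewrite author's own statement) =====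
-- stated objective: alternative
-- what changed: B sorts each tree's items by path once up front and computes each pair's common/same counts by a two-pointer sorted-merge walk, deriving different_content and the only_* counts arithmetically from the list lengths, instead of A's per-pair key-set construction, intersection, two set differences and a rescan of the intersection.
import Mathlib
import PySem

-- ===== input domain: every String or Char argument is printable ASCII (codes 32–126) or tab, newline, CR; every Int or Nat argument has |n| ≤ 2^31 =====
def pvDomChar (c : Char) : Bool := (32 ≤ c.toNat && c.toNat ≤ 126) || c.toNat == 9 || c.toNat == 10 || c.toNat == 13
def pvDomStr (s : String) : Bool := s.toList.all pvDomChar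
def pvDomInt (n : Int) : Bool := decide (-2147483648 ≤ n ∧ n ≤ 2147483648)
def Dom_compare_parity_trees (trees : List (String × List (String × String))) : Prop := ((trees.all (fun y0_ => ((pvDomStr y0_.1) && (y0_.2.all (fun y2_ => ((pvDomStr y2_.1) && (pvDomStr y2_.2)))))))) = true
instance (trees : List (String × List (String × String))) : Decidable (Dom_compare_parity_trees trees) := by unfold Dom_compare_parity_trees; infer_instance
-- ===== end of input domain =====

-- B replaces A's per-pair set algebra by a sorted-merge (two-pointer) walk over each tree's items,
-- sorted once up front, with arithmetic for the derived counts (alternative algorithm, similar cost).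

-- ===== PORT A =====
-- the body of A's inner loop: sets, intersection, rescan of the intersection, two set differences
def pvRowA (trees : List (String × List (String × String))) (left right : String) : List (String × Int) :=
  let lt := (List.lookup left trees).getD []
  let rt := (List.lookup right trees).getD []
  let left_keys : PySem.Set String := PySem.Set.ofList (lt.map Prod.fst)
  let right_keys : PySem.Set String := PySem.Set.ofList (rt.map Prod.fst)
  let common : PySem.Set String := PySem.Set.inter left_keys right_keys
  let same : Int := common.foldl (fun acc rel => if List.lookup rel lt == List.lookup rel rt then acc + 1 else acc) 0
  [("common_paths", (common.length : Int)),
   ("same_content", same),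
   ("different_content", (common.length : Int) - same),
   ("only_" ++ left, ((PySem.Set.diff left_keys right_keys).length : Int)),
   ("only_" ++ right, ((PySem.Set.diff right_keys left_keys).length : Int))]

def compare_parity_trees (trees : List (String × List (String × String))) : List (String × List (String × Int)) :=
  let names := PySem.List.sorted (trees.map Prod.fst) (fun x => x) false
  ((PySem.List.enumerate names).foldl (fun pw il =>
    (PySem.List.slice names (some (il.1 + 1)) none).foldl (fun pw right =>
      pw.insert (il.2 ++ "__vs__" ++ right) (pvRowA trees il.2 right)) pw)
    (PySem.Dict.empty : PySem.Dict String (List (String × Int)))).items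

-- ===== PORT B =====
-- B's while loop: two-pointer walk over the two key-sorted item lists, counting (common, same)
def pvMergeB : List (String × String) → List (String × String) → Int → Int → Int × Int
  | [], _, c, s => (c, s)
  | _ :: _, [], c, s => (c, s)
  | (ka, va) :: lt, (kb, vb) :: rt, c, s =>
    if ka < kb then pvMergeB lt ((kb, vb) :: rt) c s
    else if kb < ka then pvMergeB ((ka, va) :: lt) rt c s
    else pvMergeB lt rt (c + 1) (if va == vb then s + 1 else s)

-- the body of B's inner loop: merge counts, then arithmetic for the derived entries
def pvRowB (items : List (String × List (String × String))) (left right : String) : List (String × Int) :=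
  let ls := (List.lookup left items).getD []
  let rs := (List.lookup right items).getD []
  let cs := pvMergeB ls rs 0 0
  [("common_paths", cs.1),
   ("same_content", cs.2),
   ("different_content", cs.1 - cs.2),
   ("only_" ++ left, (ls.length : Int) - cs.1),
   ("only_" ++ right, (rs.length : Int) - cs.1)]

def compare_parity_trees_alt (trees : List (String × List (String × String))) : List (String × List (String × Int)) :=
  let names := PySem.List.sorted (trees.map Prod.fst) (fun x => x) false
  let items := trees.map (fun nt => (nt.1, PySem.List.sorted nt.2 (fun kv => kv.1) false))
  ((PySem.List.enumerate names).foldl (fun pw il =>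
    (PySem.List.slice names (some (il.1 + 1)) none).foldl (fun pw right =>
      pw.insert (il.2 ++ "__vs__" ++ right) (pvRowB items il.2 right)) pw)
    (PySem.Dict.empty : PySem.Dict String (List (String × Int)))).items

-- ===== PRECONDITION & SPEC =====
-- Pre_ excludes association lists with a duplicated outer name or a duplicated path inside one tree:
-- those do not represent a Python dict (the Python argument is a dict of dicts, whose keys are unique).
def Pre_compare_parity_trees (trees : List (String × List (String × String))) : Prop :=
  (trees.map Prod.fst).Nodup ∧ ∀ p ∈ trees, (p.2.map Prod.fst).Nodup
instance (trees : List (String × List (String × String))) : Decidable (Pre_compare_parity_trees trees) := by unfold Pre_compare_parity_trees; infer_instance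

def pvWitness_compare_parity_trees : (List (String × List (String × String))) :=
  [("a", [("x", "1"), ("y", "2")]), ("b", [("x", "1"), ("z", "3")])]

def Spec_compare_parity_trees (trees : List (String × List (String × String))) (out : List (String × List (String × Int))) : Prop := out = compare_parity_trees_alt trees
instance (trees : List (String × List (String × String))) (out : List (String × List (String × Int))) : Decidable (Spec_compare_parity_trees trees out) := by unfold Spec_compare_parity_trees; infer_instance

-- ===== CLAIM (what is proved, stated in full; the proofs are below) =====
def Claim_equal_compare_parity_trees : Prop := ∀ (trees : List (String × List (String × String))), Dom_compare_parity_trees trees → Pre_compare_parity_trees trees → Spec_compare_parity_trees trees (compare_parity_trees trees)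

-- ===== LEMMAS AND PROOFS =====

-- (lookup k l).isSome says k occurs as a key
theorem pvLookup_isSome {β : Type} (l : List (String × β)) (k : String) :
    (List.lookup k l).isSome = true ↔ k ∈ l.map Prod.fst := by
  induction l with
  | nil => simp
  | cons h t ih =>
    rcases eq_or_ne k h.1 with hk | hk
    · simp [List.lookup, hk]
    · have hb : (k == h.1) = false := beq_eq_false_iff_ne.mpr hk
      simp only [List.lookup, hb, List.map_cons, List.mem_cons]
      simp [ih, hk]

-- with nodup keys, lookup of a member's key returns its value
theorem pvLookup_mem {β : Type} (l : List (String × β)) (kv : String × β) (h : kv ∈ l)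
    (hn : (l.map Prod.fst).Nodup) : List.lookup kv.1 l = some kv.2 := by
  induction l with
  | nil => simp at h
  | cons hd t ih =>
    simp only [List.map_cons, List.nodup_cons] at hn
    rcases List.mem_cons.mp h with rfl | hm
    · simp [List.lookup]
    · have hk : (kv.1 == hd.1) = false := by
        refine beq_eq_false_iff_ne.mpr ?_
        intro he; exact hn.1 (he ▸ (List.mem_map_of_mem hm))
      simp only [List.lookup, hk]
      exact ih hm hn.2

theorem pvMem_of_lookup {β : Type} (l : List (String × β)) (k : String) (v : β)
    (h : List.lookup k l = some v) : (k, v) ∈ l := by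
  induction l with
  | nil => simp [List.lookup] at h
  | cons hd t ih =>
    rw [List.lookup] at h
    cases hk : (k == hd.1) with
    | true =>
      rw [hk] at h
      simp only [Option.some.injEq] at h
      refine List.mem_cons.mpr (Or.inl ?_)
      have hk' := eq_of_beq hk
      exact Prod.ext hk' h.symm
    | false =>
      rw [hk] at h
      exact List.mem_cons.mpr (Or.inr (ih h))

-- lookup is invariant under permutation when keys are unique
theorem pvLookup_perm {β : Type} (l l' : List (String × β)) (h : l.Perm l')
    (hn : (l.map Prod.fst).Nodup) (k : String) : List.lookup k l = List.lookup k l' := by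
  cases h2 : List.lookup k l' with
  | some v =>
    exact pvLookup_mem l (k, v) (h.mem_iff.mpr (pvMem_of_lookup _ _ _ h2)) hn
  | none =>
    cases h1 : List.lookup k l with
    | none => rfl
    | some w =>
      exfalso
      have hm : (k, w) ∈ l' := h.mem_iff.mp (pvMem_of_lookup l k w h1)
      have : (List.lookup k l').isSome = true :=
        (pvLookup_isSome l' k).mpr (List.mem_map_of_mem hm)
      rw [h2] at this; simp at this

theorem pvContains_eq_isSome (rt : List (String × String)) (k : String) :
    ((rt.map Prod.fst).contains k) = (List.lookup k rt).isSome := by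
  rw [List.contains_eq_mem, Bool.eq_iff_iff]
  simp only [decide_eq_true_eq, pvLookup_isSome]

-- mutual-membership counts over two nodup lists agree (both are |l ∩ r|)
theorem pvCnt_swap (l r : List String) (hl : l.Nodup) (hr : r.Nodup) :
    l.countP (fun a => r.contains a) = r.countP (fun a => l.contains a) := by
  have h1 : ∀ (x y : List String), x.Nodup → x.countP (fun a => y.contains a) = (x.toFinset ∩ y.toFinset).card := by
    intro x y hx
    rw [List.countP_eq_length_filter, ← List.toFinset_card_of_nodup (hx.filter _), List.toFinset_filter]
    congr 1
    rw [← Finset.filter_mem_eq_inter]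
    apply Finset.filter_congr
    intro a _
    simp [List.contains_eq_mem]
  rw [h1 l r hl, h1 r l hr, Finset.inter_comm]

-- keys strictly after the head are not the head's key, so lookup skips the head
theorem pvLookup_cons_ne {β : Type} (k : String) (hd : String × β) (t : List (String × β))
    (h : k ≠ hd.1) : List.lookup k (hd :: t) = List.lookup k t := by
  have hb : (k == hd.1) = false := beq_eq_false_iff_ne.mpr h
  simp [List.lookup, hb]

-- B's two-pointer merge computes (countP common, countP same) over key-strictly-sorted lists
theorem pvMerge_eq : ∀ (ls rs : List (String × String)) (c s : Int),
    ls.Pairwise (fun a b => a.1 < b.1) → rs.Pairwise (fun a b => a.1 < b.1) →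
    pvMergeB ls rs c s
      = (c + (ls.countP (fun kv => (List.lookup kv.1 rs).isSome) : Int),
         s + (ls.countP (fun kv => List.lookup kv.1 rs == some kv.2) : Int)) := by
  intro ls rs c s
  induction ls, rs, c, s using pvMergeB.induct with
  | case1 rs c s => intro _ _; simp [pvMergeB]
  | case2 hd t c s =>
    intro _ _
    simp [pvMergeB, List.lookup]
  | case3 ka va lt kb vb rt c s hlt ih =>
    intro hl hr
    rw [List.pairwise_cons] at hl
    have hnone : List.lookup ka ((kb, vb) :: rt) = none := by
      cases h : List.lookup ka ((kb, vb) :: rt) with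
      | none => rfl
      | some w =>
        exfalso
        have hm := pvMem_of_lookup _ _ _ h
        rcases List.mem_cons.mp hm with he | hm'
        · have : ka = kb := congrArg Prod.fst he
          exact absurd (this ▸ hlt) (lt_irrefl _)
        · rw [List.pairwise_cons] at hr
          have := hr.1 _ hm'
          exact absurd (hlt.trans this) (lt_irrefl _)
    rw [pvMergeB, if_pos hlt, ih hl.2 hr]
    simp only [List.countP_cons, hnone]
    simp
  | case4 ka va lt kb vb rt c s hlt hgt ih =>
    intro hl hr
    rw [List.pairwise_cons] at hr
    have hagree : ∀ kv ∈ (ka, va) :: lt, List.lookup kv.1 ((kb, vb) :: rt) = List.lookup kv.1 rt := by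
      intro kv hm
      apply pvLookup_cons_ne
      rcases List.mem_cons.mp hm with he | hm'
      · have hk : kv.1 = ka := congrArg Prod.fst he
        intro he2
        rw [hk] at he2
        exact absurd hgt (by rw [he2]; exact lt_irrefl kb)
      · rw [List.pairwise_cons] at hl
        have hka : ka < kv.1 := hl.1 _ hm'
        intro he2
        rw [he2] at hka
        exact absurd (hgt.trans hka) (lt_irrefl kb)
    rw [pvMergeB, if_neg hlt, if_pos hgt, ih hl hr.2]
    congr 2
    · exact Int.natCast_inj.mpr ((List.countP_congr (fun kv hm => by rw [hagree kv hm])).symm)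
    · exact Int.natCast_inj.mpr ((List.countP_congr (fun kv hm => by rw [hagree kv hm])).symm)
  | case5 ka va lt kb vb rt c s hlt hgt ih =>
    intro hl hr
    have heq : ka = kb := le_antisymm (not_lt.mp hgt) (not_lt.mp hlt)
    rw [List.pairwise_cons] at hl
    rw [List.pairwise_cons] at hr
    have hhead : List.lookup ka ((kb, vb) :: rt) = some vb := by
      have hb : (ka == kb) = true := beq_iff_eq.mpr heq
      simp [List.lookup, hb]
    have hagree : ∀ kv ∈ lt, List.lookup kv.1 ((kb, vb) :: rt) = List.lookup kv.1 rt := by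
      intro kv hm
      apply pvLookup_cons_ne
      have hka : ka < kv.1 := hl.1 _ hm
      intro he2
      rw [he2] at hka
      exact absurd hka (by rw [heq]; exact lt_irrefl kb)
    have hc1 : lt.countP (fun kv => (List.lookup kv.1 ((kb, vb) :: rt)).isSome)
        = lt.countP (fun kv => (List.lookup kv.1 rt).isSome) :=
      List.countP_congr (fun kv hm => by rw [hagree kv hm])
    have hc2 : lt.countP (fun kv => List.lookup kv.1 ((kb, vb) :: rt) == some kv.2)
        = lt.countP (fun kv => List.lookup kv.1 rt == some kv.2) :=
      List.countP_congr (fun kv hm => by rw [hagree kv hm])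
    have ihx := ih hl.2 hr.2
    rw [pvMergeB, if_neg hlt, if_neg hgt]
    simp only [List.countP_cons, hhead, hc1, hc2, Option.isSome_some]
    by_cases hv : va = vb
    · have h1 : (va == vb) = true := beq_iff_eq.mpr hv
      have h2 : (some vb == some va) = true := by simp [hv]
      rw [dif_pos h1] at ihx
      rw [if_pos h1, ihx, h2]
      simp only [Prod.mk.injEq, if_pos trivial]
      omega
    · have h1 : (va == vb) = true → False := by
        intro h; exact hv (beq_iff_eq.mp h)
      have h2 : (some vb == some va) = false := by
        simp only [beq_eq_false_iff_ne, ne_eq, Option.some.injEq]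
        exact fun he => hv he.symm
      rw [dif_neg h1] at ihx
      rw [if_neg h1, ihx, h2]
      simp only [Prod.mk.injEq, if_pos trivial, Bool.false_eq_true, if_neg not_false]
      omega

-- nodup keys of any looked-up tree, from Pre_
theorem pvTree_nodup (trees : List (String × List (String × String)))
    (hPre : Pre_compare_parity_trees trees) (k : String) :
    (((List.lookup k trees).getD []).map Prod.fst).Nodup := by
  cases h : List.lookup k trees with
  | none => simp
  | some t =>
    exact hPre.2 (k, t) (pvMem_of_lookup trees k t h)

-- the key-sorted copy of a nodup-keys tree is strictly key-sorted
theorem pvSorted_strict (l : List (String × String)) (hn : (l.map Prod.fst).Nodup) :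
    (PySem.List.sorted l (fun kv => kv.1) false).Pairwise (fun a b => a.1 < b.1) := by
  have hperm : (PySem.List.sorted l (fun kv => kv.1) false).Perm l := PySem.List.sorted_perm ..
  have hle : (PySem.List.sorted l (fun kv => kv.1) false).Pairwise (fun a b => a.1 ≤ b.1) :=
    PySem.List.sorted_pairwise ..
  have hnd : ((PySem.List.sorted l (fun kv => kv.1) false).map Prod.fst).Nodup :=
    (hperm.map Prod.fst).nodup_iff.mpr hn
  have hne : (PySem.List.sorted l (fun kv => kv.1) false).Pairwise (fun a b => a.1 ≠ b.1) :=
    (List.pairwise_map.mp hnd)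
  exact (hle.and hne).imp (fun h => lt_of_le_of_ne h.1 h.2)

theorem pvLookup_sorted (trees : List (String × List (String × String))) (k : String) :
    List.lookup k (trees.map (fun nt => (nt.1, PySem.List.sorted nt.2 (fun kv => kv.1) false)))
      = (List.lookup k trees).map (fun t => PySem.List.sorted t (fun kv => kv.1) false) := by
  induction trees with
  | nil => simp
  | cons hd t ih =>
    cases hk : (k == hd.1) with
    | true => simp [List.lookup, hk]
    | false => simp [List.lookup, hk, ih]

theorem pvGetD_sorted (o : Option (List (String × String))) :
    (o.map (fun t => PySem.List.sorted t (fun kv => kv.1) false)).getD []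
      = PySem.List.sorted (o.getD []) (fun kv => kv.1) false := by
  cases o with
  | none => rfl
  | some t => rfl

theorem pvRow_eq (trees : List (String × List (String × String)))
    (hPre : Pre_compare_parity_trees trees) (left right : String) :
    pvRowA trees left right
      = pvRowB (trees.map (fun nt => (nt.1, PySem.List.sorted nt.2 (fun kv => kv.1) false))) left right := by
  have hlk := pvTree_nodup trees hPre left
  have hrk := pvTree_nodup trees hPre right
  unfold pvRowA pvRowB
  rw [pvLookup_sorted, pvLookup_sorted, pvGetD_sorted, pvGetD_sorted]
  generalize hg1 : (List.lookup left trees).getD [] = lt at hlk ⊢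
  generalize hg2 : (List.lookup right trees).getD [] = rt at hrk ⊢
  dsimp only
  have hlperm : (PySem.List.sorted lt (fun kv => kv.1) false).Perm lt := PySem.List.sorted_perm ..
  have hrperm : (PySem.List.sorted rt (fun kv => kv.1) false).Perm rt := PySem.List.sorted_perm ..
  have hrsnd : ((PySem.List.sorted rt (fun kv => kv.1) false).map Prod.fst).Nodup :=
    ((hrperm.map Prod.fst).nodup_iff.mpr hrk)
  -- the merge walk computes the two counts over lt/rt
  have hmerge : pvMergeB (PySem.List.sorted lt (fun kv => kv.1) false) (PySem.List.sorted rt (fun kv => kv.1) false) 0 0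
      = ((lt.countP (fun kv => (List.lookup kv.1 rt).isSome) : Int),
         (lt.countP (fun kv => List.lookup kv.1 rt == some kv.2) : Int)) := by
    rw [pvMerge_eq _ _ 0 0 (pvSorted_strict lt hlk) (pvSorted_strict rt hrk)]
    have hlk1 : ∀ k, List.lookup k (PySem.List.sorted rt (fun kv => kv.1) false) = List.lookup k rt :=
      pvLookup_perm _ _ hrperm hrsnd
    have e1 : (PySem.List.sorted lt (fun kv => kv.1) false).countP
          (fun kv => (List.lookup kv.1 (PySem.List.sorted rt (fun kv => kv.1) false)).isSome)
        = lt.countP (fun kv => (List.lookup kv.1 rt).isSome) := by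
      rw [List.countP_congr (fun kv _ => by rw [hlk1 kv.1])]
      exact hlperm.countP_eq _
    have e2 : (PySem.List.sorted lt (fun kv => kv.1) false).countP
          (fun kv => List.lookup kv.1 (PySem.List.sorted rt (fun kv => kv.1) false) == some kv.2)
        = lt.countP (fun kv => List.lookup kv.1 rt == some kv.2) := by
      rw [List.countP_congr (fun kv _ => by rw [hlk1 kv.1])]
      exact hlperm.countP_eq _
    rw [e1, e2]; simp
  have hlen1 : ((PySem.List.sorted lt (fun kv => kv.1) false).length : Int) = (lt.length : Int) := by
    exact_mod_cast hlperm.length_eq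
  have hlen2 : ((PySem.List.sorted rt (fun kv => kv.1) false).length : Int) = (rt.length : Int) := by
    exact_mod_cast hrperm.length_eq
  rw [hmerge, hlen1, hlen2]
  -- now reduce A's set-algebra row to the same two counts
  have hlset : PySem.Set.ofList (lt.map Prod.fst) = lt.map Prod.fst :=
    PySem.Set.ofList_eq_self_of_nodup _ hlk
  have hrset : PySem.Set.ofList (rt.map Prod.fst) = rt.map Prod.fst :=
    PySem.Set.ofList_eq_self_of_nodup _ hrk
  have hC : ((PySem.Set.inter (PySem.Set.ofList (lt.map Prod.fst)) (PySem.Set.ofList (rt.map Prod.fst))).length : Int)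
      = (lt.countP (fun kv => (List.lookup kv.1 rt).isSome) : Int) := by
    rw [hlset, hrset]
    show (((lt.map Prod.fst).filter (fun x => (rt.map Prod.fst).contains x)).length : Int) = _
    rw [← List.countP_eq_length_filter, List.countP_map]
    congr 2
    funext kv
    exact pvContains_eq_isSome rt kv.1
  have hS : ((PySem.Set.inter (PySem.Set.ofList (lt.map Prod.fst)) (PySem.Set.ofList (rt.map Prod.fst))).foldl
        (fun acc rel => if List.lookup rel lt == List.lookup rel rt then acc + 1 else acc) (0 : Int))
      = (lt.countP (fun kv => List.lookup kv.1 rt == some kv.2) : Int) := by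
    rw [hlset, hrset, PySem.List.foldl_if_add_one, zero_add]
    show (((lt.map Prod.fst).filter (fun x => (rt.map Prod.fst).contains x)).countP
        (fun rel => List.lookup rel lt == List.lookup rel rt) : Int) = _
    rw [List.countP_filter, List.countP_map]
    congr 1
    apply List.countP_congr
    intro kv hm
    rw [Function.comp_apply, pvLookup_mem lt kv hm hlk, pvContains_eq_isSome]
    cases h : List.lookup kv.1 rt with
    | none => simp
    | some v =>
      simp only [Option.isSome_some, Bool.and_true, beq_iff_eq, Option.some.injEq]
      exact eq_comm
  have hOL : ((PySem.Set.diff (PySem.Set.ofList (lt.map Prod.fst)) (PySem.Set.ofList (rt.map Prod.fst))).length : Int)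
      = (lt.length : Int) - (lt.countP (fun kv => (List.lookup kv.1 rt).isSome) : Int) := by
    rw [hlset, hrset]
    show (((lt.map Prod.fst).filter (fun x => !(rt.map Prod.fst).contains x)).length : Int) = _
    rw [← List.countP_eq_length_filter]
    have hsplit := List.length_eq_countP_add_countP (fun x => (rt.map Prod.fst).contains x) (l := lt.map Prod.fst)
    have he1 : (lt.map Prod.fst).countP (fun a => decide ¬(fun x => (rt.map Prod.fst).contains x) a = true)
        = (lt.map Prod.fst).countP (fun x => !(rt.map Prod.fst).contains x) := by
      apply List.countP_congr; intro x _; simp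
    have he2 : (lt.map Prod.fst).countP (fun x => (rt.map Prod.fst).contains x)
        = lt.countP (fun kv => (List.lookup kv.1 rt).isSome) := by
      rw [List.countP_map]
      congr 1
      funext kv
      exact pvContains_eq_isSome rt kv.1
    rw [he1, he2] at hsplit
    have hlen : (lt.map Prod.fst).length = lt.length := List.length_map ..
    omega
  have hOR : ((PySem.Set.diff (PySem.Set.ofList (rt.map Prod.fst)) (PySem.Set.ofList (lt.map Prod.fst))).length : Int)
      = (rt.length : Int) - (lt.countP (fun kv => (List.lookup kv.1 rt).isSome) : Int) := by
    rw [hlset, hrset]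
    show (((rt.map Prod.fst).filter (fun x => !(lt.map Prod.fst).contains x)).length : Int) = _
    rw [← List.countP_eq_length_filter]
    have hsplit := List.length_eq_countP_add_countP (fun x => (lt.map Prod.fst).contains x) (l := rt.map Prod.fst)
    have he1 : (rt.map Prod.fst).countP (fun a => decide ¬(fun x => (lt.map Prod.fst).contains x) a = true)
        = (rt.map Prod.fst).countP (fun x => !(lt.map Prod.fst).contains x) := by
      apply List.countP_congr; intro x _; simp
    have he2 : (rt.map Prod.fst).countP (fun x => (lt.map Prod.fst).contains x)
        = lt.countP (fun kv => (List.lookup kv.1 rt).isSome) := by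
      rw [pvCnt_swap _ _ hrk hlk, List.countP_map]
      congr 1
      funext kv
      exact pvContains_eq_isSome rt kv.1
    rw [he1, he2] at hsplit
    have hlen : (rt.map Prod.fst).length = rt.length := List.length_map ..
    omega
  rw [hC, hS, hOL, hOR]

theorem compare_parity_trees_spec : Claim_equal_compare_parity_trees := by
  intro trees _ hPre
  unfold Spec_compare_parity_trees compare_parity_trees compare_parity_trees_alt
  simp only [pvRow_eq trees hPre]
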